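-- pv_equiv track=rewrite | github.com/shado-glitch/Mini_Assessment1 | assessment1.py | list_of_even_numbers
-- ===== SOURCE A (Python) =====
-- def list_of_even_numbers(numbers):
--
--     numbers_list = []
--     even_numbers = []
--     for i in range(numbers):
--         numbers_list.append(i)
--     for i in numbers_list[1:]:
--         if i % 2 == 0:
--             even_numbers.append(i)
--
--
--     return even_numbers
--
--     pass
-- ===== SOURCE B (Python) =====
-- def list_of_even_numbers(numbers):
--     return list(range(2, numbers, 2))
-- ===== Notes on version B (the rewrite author's own statement) =====
-- stated objective: simpler
-- what changed: B emits the evens directly as a stepped range(2, numbers, 2) instead of building the full 0..numbers-1 list, slicing off the head and filtering with a modulo test.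
import Mathlib
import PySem

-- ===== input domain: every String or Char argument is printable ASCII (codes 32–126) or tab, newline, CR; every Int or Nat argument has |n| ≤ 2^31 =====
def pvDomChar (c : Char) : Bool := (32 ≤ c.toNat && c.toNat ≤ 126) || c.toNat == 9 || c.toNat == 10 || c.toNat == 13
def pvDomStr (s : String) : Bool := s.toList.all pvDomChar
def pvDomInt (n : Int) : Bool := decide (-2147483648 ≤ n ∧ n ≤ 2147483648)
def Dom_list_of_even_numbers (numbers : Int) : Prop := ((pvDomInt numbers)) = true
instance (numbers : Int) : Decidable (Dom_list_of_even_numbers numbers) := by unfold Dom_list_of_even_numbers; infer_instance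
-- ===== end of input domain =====

-- B replaces A's build-all/slice/modulo-filter pipeline with a direct stepped range of the evens (simpler).

-- ===== PORT A =====
def list_of_even_numbers (numbers : Int) : List Int :=
  let numbers_list : List Int :=
    (PySem.List.pyRange 0 numbers 1).foldl (fun acc i => acc ++ [i]) []
  let even_numbers : List Int :=
    (PySem.List.slice numbers_list (some 1) none).foldl
      (fun acc i => if PySem.Int.mod i 2 == 0 then acc ++ [i] else acc) []
  even_numbers

-- ===== PORT B =====
def list_of_even_numbers_alt (numbers : Int) : List Int :=
  PySem.List.pyRange 2 numbers 2

-- ===== PRECONDITION & SPEC =====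
def Spec_list_of_even_numbers (numbers : Int) (out : List Int) : Prop := out = list_of_even_numbers_alt numbers
instance (numbers : Int) (out : List Int) : Decidable (Spec_list_of_even_numbers numbers out) := by unfold Spec_list_of_even_numbers; infer_instance

-- ===== CLAIM (what is proved, stated in full; the proofs are below) =====
def Claim_equal_list_of_even_numbers : Prop := ∀ (numbers : Int), Dom_list_of_even_numbers numbers → Spec_list_of_even_numbers numbers (list_of_even_numbers numbers)

-- ===== LEMMAS AND PROOFS =====

-- A's second loop is a filter with an accumulator
lemma pv_filter_fold (l acc : List Int) :
    List.foldl (fun acc i => if PySem.Int.mod i 2 == 0 then acc ++ [i] else acc) acc l =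
    acc ++ l.filter (fun i => PySem.Int.mod i 2 == 0) := by
  induction l generalizing acc with
  | nil => simp
  | cons x xs ih =>
    simp only [List.foldl_cons, List.filter_cons]
    by_cases hx : (PySem.Int.mod x 2 == 0) = true
    · simp only [hx, if_true]
      rw [ih]
      simp
    · rw [Bool.not_eq_true] at hx
      simp only [hx, Bool.false_eq_true, if_false]
      exact ih acc

-- the filter over 1,2,…,m keeps exactly the evens 2,4,…
lemma pv_key (m : Nat) :
    (((List.range m).map (fun (k : Nat) => (1 : Int) + (k : Int))).filter
        (fun i => PySem.Int.mod i 2 == 0)) =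
    (List.range (m / 2)).map (fun (k : Nat) => (2 : Int) + 2 * (k : Int)) := by
  induction m with
  | zero => simp
  | succ m ih =>
    rw [List.range_succ, List.map_append, List.filter_append, ih]
    have hfm : PySem.Int.mod (1 + (m : Int)) 2 = (1 + (m : Int)) % 2 := by
      simp [PySem.Int.mod, Int.fmod_eq_emod]
    rcases Nat.even_or_odd m with hm | hm
    · obtain ⟨t, ht⟩ := hm
      have hmod : (PySem.Int.mod (1 + (m : Int)) 2 == 0) = false := by
        rw [hfm]
        simp only [beq_eq_false_iff_ne, ne_eq]
        omega
      have hdiv : (m + 1) / 2 = m / 2 := by omega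
      simp only [List.map_cons, List.map_nil, List.filter_cons, List.filter_nil, hmod,
        Bool.false_eq_true, if_false, List.append_nil, hdiv]
    · obtain ⟨t, ht⟩ := hm
      have hmod : (PySem.Int.mod (1 + (m : Int)) 2 == 0) = true := by
        rw [hfm]
        simp only [beq_iff_eq]
        omega
      have hdiv : (m + 1) / 2 = m / 2 + 1 := by omega
      have ht2 : m / 2 = t := by omega
      simp only [List.map_cons, List.map_nil, List.filter_cons, List.filter_nil, hmod, if_true,
        hdiv, List.range_succ, List.map_append, ht2]
      congr 2
      omega

-- ===== VERDICT (by name: the statement is the Claim_ definition above) =====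
theorem list_of_even_numbers_spec : Claim_equal_list_of_even_numbers := by
  intro n _
  show _ = _
  unfold list_of_even_numbers list_of_even_numbers_alt
  simp only [PySem.List.foldl_append_eq_flatMap, List.nil_append, List.flatMap_singleton',
    PySem.List.slice_from_one]
  rw [pv_filter_fold, List.nil_append]
  by_cases hn : 0 < n
  · rw [PySem.List.pyRange_one_cons (by omega : (0:Int) < n)]
    simp only [List.tail_cons, zero_add]
    rw [PySem.List.pyRange_one 1 n, pv_key]
    rw [PySem.List.pyRange_of_pos 2 n (by norm_num : (0:Int) < 2)]
    by_cases h2 : (2 : Int) < n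
    · simp only [if_pos h2]
      have hb : (n - 2 + 2 - 1) = n - 1 := by ring
      rw [hb]
      have hq : (n - 1).toNat / 2 = ((n - 1) / 2).toNat := by omega
      rw [hq]
    · simp only [if_neg h2]
      have h0 : (n - 1).toNat / 2 = 0 := by omega
      rw [h0]
  · rw [PySem.List.pyRange_one_eq_nil (by omega : n ≤ 0),
        PySem.List.pyRange_of_pos 2 n (by norm_num : (0:Int) < 2)]
    simp only [if_neg (by omega : ¬ (2:Int) < n)]
    simp
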